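-- pv_equiv track=rewrite | github.com/necarlson97/Omnissiah-Shrine | preprocess/sanitize_filename.py | filename_to_espeak
-- ===== SOURCE A (Python) =====
-- import unicodedata
-- from typing import Dict
--
-- PHONETIC_MAP: Dict[str, str] = {
--     "#": "(hsh)",  # a phoneme, 'h' sounding
--     "'": "(pri)",  # primary stress
--     ",": "(sec)",  # secondary stress
--     "%": "(uns)",  # unstressed syllable
--     "=": "(pre)",  # put primary stress on preceding
--     "||": "(bou)",  # word boundary
--     "|": "(sep)",  # separator
--     ':': '(pau)',  # pause
--     "_": "(ssp)",  # Short pause (? is this right?)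
--
--     # These are not expected, but we might as well include them:
--     "<": "(lst)",
--     ">": "(grt)",
--     '"': "(dbq)",
--     "/": "(fws)",
--     "/": "(bks)",
--     "?": "(qsm)",
--     "*": "(ast)",
-- }
--
-- def filename_to_espeak(sanitized: str) -> str:
--     """
--     Convert a sanitized filename back into the original eSpeak phonetic format.
--     """
--     # Reverse case encoding
--     restored = ""
--     skip_next = False
--     for i, char in enumerate(sanitized):
--         if skip_next:
--             skip_next = False
--             continue
--         if char == "^" and i + 1 < len(sanitized):
--             restored += sanitized[i + 1].upper()
--             skip_next = True
--         else:
--             restored += char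
--
--     # Replace mapped characters back to original phonetic characters
--     reversed_map = {v: k for k, v in PHONETIC_MAP.items()}
--     for replacement, char in reversed_map.items():
--         restored = restored.replace(replacement, char)
--
--     # Normalize back to NFC (combine characters)
--     restored = unicodedata.normalize("NFC", restored)
--
--     return restored
-- ===== SOURCE B (Python) =====
-- import re
-- import unicodedata
-- from typing import Dict
--
-- PHONETIC_MAP: Dict[str, str] = {
--     "#": "(hsh)", "'": "(pri)", ",": "(sec)", "%": "(uns)", "=": "(pre)",
--     "||": "(bou)", "|": "(sep)", ':': '(pau)', "_": "(ssp)",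
--     "<": "(lst)", ">": "(grt)", '"': "(dbq)", "/": "(fws)", "/": "(bks)",
--     "?": "(qsm)", "*": "(ast)",
-- }
--
-- _TOKEN_RE = re.compile(
--     r"\((?:hsh|pri|sec|uns|pre|bou|sep|pau|ssp|lst|grt|dbq|bks|qsm|ast)\)")
--
--
-- def filename_to_espeak(sanitized: str) -> str:
--     """
--     Convert a sanitized filename back into the original eSpeak phonetic format.
--     """
--     # Reverse case encoding: '^x' -> 'X' in one regex pass (DOTALL so a
--     # newline after '^' behaves like any other character; a trailing lone
--     # '^' simply finds no match and stays).
--     restored = re.sub(r"\^(.)", lambda m: m.group(1).upper(), sanitized,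
--                       flags=re.DOTALL)
--
--     # Replace every phonetic token in a single left-to-right scan.
--     reversed_map = {v: k for k, v in PHONETIC_MAP.items()}
--     restored = _TOKEN_RE.sub(lambda m: reversed_map[m.group(0)], restored)
--
--     # Normalize back to NFC (combine characters)
--     return unicodedata.normalize("NFC", restored)
-- ===== Notes on version B (the rewrite author's own statement) =====
-- stated objective: faster
-- what changed: The case-restore index loop with a skip_next flag becomes a single regex substitution (\^(.) with DOTALL), and the 15 sequential whole-string str.replace passes become one compiled-regex left-to-right scan that maps each phonetic token through the reversed dict.
import Mathlib
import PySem

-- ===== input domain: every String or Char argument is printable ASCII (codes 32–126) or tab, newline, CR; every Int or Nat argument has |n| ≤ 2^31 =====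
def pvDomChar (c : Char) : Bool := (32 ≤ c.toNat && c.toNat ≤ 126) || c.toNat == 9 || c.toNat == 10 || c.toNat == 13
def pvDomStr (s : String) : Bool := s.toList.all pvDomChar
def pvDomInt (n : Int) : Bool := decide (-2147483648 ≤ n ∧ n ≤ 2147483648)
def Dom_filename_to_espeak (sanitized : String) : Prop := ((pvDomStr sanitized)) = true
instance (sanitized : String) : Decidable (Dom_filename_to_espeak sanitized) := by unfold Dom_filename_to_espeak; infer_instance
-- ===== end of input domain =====

-- B replaces A's per-character index loop with skip flag by one regex substitution, and A's 15
-- sequential full-string replace passes by a single left-to-right token scan (measured faster).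


-- ===== PORT A =====
-- PHONETIC_MAP dict literal (the duplicate "/" key overwrites in place, as in Python)
def pvPhoneticPairs : List (String × String) :=
  [("#", "(hsh)"), ("'", "(pri)"), (",", "(sec)"), ("%", "(uns)"), ("=", "(pre)"),
   ("||", "(bou)"), ("|", "(sep)"), (":", "(pau)"), ("_", "(ssp)"),
   ("<", "(lst)"), (">", "(grt)"), ("\"", "(dbq)"), ("/", "(fws)"), ("/", "(bks)"),
   ("?", "(qsm)"), ("*", "(ast)")]

def pvPHONETIC_MAP : PySem.Dict String String :=
  pvPhoneticPairs.foldl (fun d p => d.insert p.1 p.2) PySem.Dict.empty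

-- body of A's 'for i, char in enumerate(sanitized)' loop; state = (restored, skip_next)
def pvStepA (cs : List Char) (st : List Char × Bool) (ic : Int × Char) : List Char × Bool :=
  if st.2 then (st.1, false)
  else if ic.2 = '^' ∧ ic.1 + 1 < PySem.List.len cs then
    (st.1 ++ [PySem.Chars.upperChar (PySem.List.pyGetD cs (ic.1 + 1) ' ')], true)
  else (st.1 ++ [ic.2], false)

def filename_to_espeak (sanitized : String) : String :=
  let cs := sanitized.toList
  let restored :=
    String.ofList ((PySem.List.enumerate cs 0).foldl (pvStepA cs) ([], false)).1
  let reversed_map : PySem.Dict String String :=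
    pvPHONETIC_MAP.items.foldl (fun d p => d.insert p.2 p.1) PySem.Dict.empty
  let restored :=
    reversed_map.items.foldl (fun s p => PySem.Str.replace s p.1 p.2) restored
  -- unicodedata.normalize("NFC", ·) is the identity on the ASCII strings of Dom_
  restored

-- ===== PORT B =====
-- the token alternation of B's compiled regex, each token with its reversed-map replacement
def pvTokens : List (List Char × List Char) :=
  [(['(','h','s','h',')'], ['#']),
   (['(','p','r','i',')'], ['\'']),
   (['(','s','e','c',')'], [',']),
   (['(','u','n','s',')'], ['%']),
   (['(','p','r','e',')'], ['=']),
   (['(','b','o','u',')'], ['|','|']),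
   (['(','s','e','p',')'], ['|']),
   (['(','p','a','u',')'], [':']),
   (['(','s','s','p',')'], ['_']),
   (['(','l','s','t',')'], ['<']),
   (['(','g','r','t',')'], ['>']),
   (['(','d','b','q',')'], ['"']),
   (['(','b','k','s',')'], ['/']),
   (['(','q','s','m',')'], ['?']),
   (['(','a','s','t',')'], ['*'])]

-- re.sub(r'\^(.)', upper, ·, flags=DOTALL): each '^'+char pair becomes the uppercased char
def pvCaseRestore : List Char → List Char
  | [] => []
  | '^' :: c :: rest => PySem.Chars.upperChar c :: pvCaseRestore rest
  | c :: rest => c :: pvCaseRestore rest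

-- _TOKEN_RE.sub(lambda m: reversed_map[m.group(0)], ·): one left-to-right scan; every
-- alternative of the regex is 5 chars long, so a match consumes c and 4 chars of rest
def pvTokenSub (l : List Char) : List Char :=
  match l with
  | [] => []
  | c :: rest =>
    match pvTokens.find? (fun p => p.1.isPrefixOf (c :: rest)) with
    | some p => p.2 ++ pvTokenSub (rest.drop 4)
    | none => c :: pvTokenSub rest
termination_by l.length
decreasing_by all_goals simp [List.length_drop]

def filename_to_espeak_alt (sanitized : String) : String :=
  -- unicodedata.normalize("NFC", ·) is the identity on the ASCII strings of Dom_
  String.ofList (pvTokenSub (pvCaseRestore sanitized.toList))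

-- ===== PRECONDITION & SPEC =====
def Spec_filename_to_espeak (sanitized : String) (out : String) : Prop := out = filename_to_espeak_alt sanitized
instance (sanitized : String) (out : String) : Decidable (Spec_filename_to_espeak sanitized out) := by unfold Spec_filename_to_espeak; infer_instance

-- ===== CLAIM (what is proved, stated in full; the proofs are below) =====
def Claim_equal_filename_to_espeak : Prop := ∀ (sanitized : String), Dom_filename_to_espeak sanitized → Spec_filename_to_espeak sanitized (filename_to_espeak sanitized)

-- ===== LEMMAS AND PROOFS =====

-- abbreviation used only in the proofs: one phonetic-replacement fold step on char lists
def pvRepl (s : List Char) (p : List Char × List Char) : List Char :=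
  PySem.Chars.replace s p.1 p.2

-- go accumulates: the accumulator can be pulled out front
theorem pv_go_acc (old new : List Char) :
    ∀ (fuel : Nat) (s acc : List Char),
      PySem.Chars.replace.go old new fuel s acc =
        acc.reverse ++ PySem.Chars.replace.go old new fuel s [] := by
  intro fuel
  induction fuel with
  | zero =>
    intro s acc
    rw [PySem.Chars.replace.go, PySem.Chars.replace.go]
    simp
  | succ n ih =>
    intro s acc
    cases s with
    | nil =>
      rw [PySem.Chars.replace.go, PySem.Chars.replace.go] <;> simp
    | cons c t =>
      rw [PySem.Chars.replace.go, PySem.Chars.replace.go]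
      split
      · rw [ih _ (new.reverse ++ acc), ih _ (new.reverse ++ [])]
        simp
      · rw [ih _ (c :: acc), ih _ [c]]
        simp

-- go is fuel-insensitive above s.length (old nonempty)
theorem pv_go_fuel (old new : List Char) (hold : old ≠ []) :
    ∀ (fuel : Nat) (s acc : List Char), s.length ≤ fuel →
      PySem.Chars.replace.go old new fuel s acc =
        PySem.Chars.replace.go old new s.length s acc := by
  have hpos : 1 ≤ old.length := List.length_pos_iff.mpr hold
  intro fuel
  induction fuel using Nat.strong_induction_on with
  | _ fuel ih =>
    intro s acc hle
    cases s with
    | nil =>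
      cases fuel with
      | zero => rfl
      | succ n =>
        simp only [List.length_nil]
        rw [PySem.Chars.replace.go, PySem.Chars.replace.go]
        all_goals simp
    | cons c t =>
      have hlt : t.length + 1 ≤ fuel := by simpa using hle
      cases fuel with
      | zero => omega
      | succ n =>
        rw [PySem.Chars.replace.go]
        rw [show (c :: t).length = t.length + 1 from rfl]
        rw [PySem.Chars.replace.go]
        split
        · rw [ih n (by omega) _ _ (by simp; omega), ih t.length (by omega) _ _ (by simp; omega)]
        · rw [ih n (by omega) _ _ (by omega)]

theorem pv_replace_nil (old new : List Char) (hold : old ≠ []) :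
    PySem.Chars.replace [] old new = [] := by
  rw [PySem.Chars.replace]
  rw [if_neg (by simpa using hold)]
  simp only [List.length_nil]
  rw [PySem.Chars.replace.go]
  simp

theorem pv_replace_cons_not_prefix (old new : List Char) (hold : old ≠ [])
    (c : Char) (s : List Char) (h : ¬ old <+: (c :: s)) :
    PySem.Chars.replace (c :: s) old new = c :: PySem.Chars.replace s old new := by
  rw [PySem.Chars.replace, PySem.Chars.replace]
  rw [if_neg (by simpa using hold), if_neg (by simpa using hold)]
  rw [show (c :: s).length = s.length + 1 from rfl]
  rw [PySem.Chars.replace.go]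
  rw [if_neg (by simpa [List.isPrefixOf_iff_prefix] using h)]
  rw [pv_go_acc]
  simp

theorem pv_replace_append_self (old new s : List Char) (hold : old ≠ []) :
    PySem.Chars.replace (old ++ s) old new = new ++ PySem.Chars.replace s old new := by
  rcases old with _ | ⟨c, t⟩
  · exact absurd rfl hold
  rw [PySem.Chars.replace, PySem.Chars.replace]
  rw [if_neg (by simp), if_neg (by simp)]
  rw [show ((c :: t) ++ s).length = (t.length + s.length) + 1 by simp]
  rw [show ((c :: t) ++ s) = c :: (t ++ s) from rfl]
  rw [PySem.Chars.replace.go]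
  rw [if_pos (List.isPrefixOf_iff_prefix.mpr (by exact ⟨s, rfl⟩))]
  rw [show List.drop (c :: t).length (c :: (t ++ s)) = s by simp]
  rw [pv_go_fuel (c :: t) new (by simp) _ _ _ (by omega)]
  rw [pv_go_acc]
  simp

-- a block free of old's first character passes through unchanged
theorem pv_replace_through_free (old new : List Char) (c₀ : Char) (h0 : old.head? = some c₀) :
    ∀ (t s : List Char), (∀ c ∈ t, c ≠ c₀) →
      PySem.Chars.replace (t ++ s) old new = t ++ PySem.Chars.replace s old new := by
  have hold : old ≠ [] := by intro hn; rw [hn] at h0; simp at h0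
  intro t
  induction t with
  | nil => intro s _; simp
  | cons a t ih =>
    intro s hfree
    have hnp : ¬ old <+: (a :: (t ++ s)) := by
      intro hp
      rcases old with _ | ⟨o, old'⟩
      · simp at h0
      · have ho : o = c₀ := by simpa using h0
        have := (List.cons_prefix_cons.mp hp).1
        exact hfree a List.mem_cons_self (by rw [← this, ho])
    rw [List.cons_append, pv_replace_cons_not_prefix old new hold a _ hnp,
        ih s (fun x hx => hfree x (List.mem_cons_of_mem _ hx))]
    simp

-- a '('-headed block that old does not match passes through unchanged
theorem pv_replace_token_no_match (old new : List Char) (t' rest : List Char)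
    (h0 : old.head? = some '(') (hlen : old.length ≤ t'.length + 1)
    (hnp : ¬ old <+: ('(' :: t')) (ht' : ∀ c ∈ t', c ≠ '(') :
    PySem.Chars.replace (('(' :: t') ++ rest) old new
      = ('(' :: t') ++ PySem.Chars.replace rest old new := by
  have hold : old ≠ [] := by intro hn; rw [hn] at h0; simp at h0
  have hnp2 : ¬ old <+: (('(' :: t') ++ rest) := by
    intro hp
    have htake : old = (('(' :: t') ++ rest).take old.length := by
      obtain ⟨u, hu⟩ := hp
      rw [← hu]
      simp
    rw [List.take_append_of_le_length (by simpa using hlen)] at htake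
    exact hnp (htake ▸ List.take_prefix _ _)
  rw [show (('(' :: t') ++ rest) = '(' :: (t' ++ rest) from rfl] at hnp2 ⊢
  rw [pv_replace_cons_not_prefix old new hold _ _ hnp2]
  rw [pv_replace_through_free old new '(' h0 t' rest ht']
  simp

-- a prefix avoiding new's first character survives replace backwards
theorem pv_prefix_replace_rev (old new : List Char) (hold : old ≠ []) (hnew : new ≠ []) :
    ∀ (s q : List Char), (∀ c ∈ q, new.head? ≠ some c) →
      q <+: PySem.Chars.replace s old new → q <+: s := by
  suffices H : ∀ (n : Nat) (s q : List Char), s.length ≤ n → (∀ c ∈ q, new.head? ≠ some c) →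
      q <+: PySem.Chars.replace s old new → q <+: s by
    intro s q hq hp
    exact H s.length s q le_rfl hq hp
  intro n
  induction n with
  | zero =>
    intro s q hlen hq hp
    have hs : s = [] := List.eq_nil_of_length_eq_zero (by omega)
    subst hs
    rw [pv_replace_nil old new hold] at hp
    exact hp
  | succ n ih =>
    intro s q hlen hq hp
    cases s with
    | nil =>
      rw [pv_replace_nil old new hold] at hp
      exact hp
    | cons c s' =>
      by_cases hpre : old <+: (c :: s')
      · obtain ⟨s₂, hs₂⟩ := hpre
        rw [← hs₂, pv_replace_append_self old new s₂ hold] at hp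
        cases q with
        | nil => exact List.nil_prefix
        | cons d q' =>
          exfalso
          rcases new with _ | ⟨e, new'⟩
          · exact hnew rfl
          · have hd : d = e := (List.cons_prefix_cons.mp (by simpa using hp)).1
            exact hq d List.mem_cons_self (by simp [hd])
      · rw [pv_replace_cons_not_prefix old new hold c s' hpre] at hp
        cases q with
        | nil => exact List.nil_prefix
        | cons d q' =>
          obtain ⟨hd, hq'⟩ := List.cons_prefix_cons.mp hp
          have := ih s' q' (by simpa using Nat.lt_succ_iff.mp (by simpa using hlen))
            (fun x hx => hq x (List.mem_cons_of_mem _ hx)) hq'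
          exact List.cons_prefix_cons.mpr ⟨hd, this⟩

theorem pv_fold_token_no_match (ps : List (List Char × List Char)) (t' rest : List Char)
    (h : ∀ p ∈ ps, p.1.head? = some '(' ∧ p.1.length ≤ t'.length + 1 ∧ ¬ p.1 <+: ('(' :: t'))
    (ht' : ∀ c ∈ t', c ≠ '(') :
    ps.foldl pvRepl (('(' :: t') ++ rest) = ('(' :: t') ++ ps.foldl pvRepl rest := by
  induction ps generalizing rest with
  | nil => simp
  | cons p ps ih =>
    obtain ⟨h0, hl, hnp⟩ := h p List.mem_cons_self
    rw [List.foldl_cons, List.foldl_cons]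
    rw [show pvRepl (('(' :: t') ++ rest) p
          = ('(' :: t') ++ pvRepl rest p from
        pv_replace_token_no_match p.1 p.2 t' rest h0 hl hnp ht']
    exact ih (pvRepl rest p) (fun q hq => h q (List.mem_cons_of_mem _ hq))

theorem pv_fold_free (ps : List (List Char × List Char)) (u rest : List Char)
    (hu : ∀ c ∈ u, c ≠ '(') (hp : ∀ p ∈ ps, p.1.head? = some '(') :
    ps.foldl pvRepl (u ++ rest) = u ++ ps.foldl pvRepl rest := by
  induction ps generalizing rest with
  | nil => simp
  | cons p ps ih =>
    rw [List.foldl_cons, List.foldl_cons]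
    rw [show pvRepl (u ++ rest) p = u ++ pvRepl rest p from
        pv_replace_through_free p.1 p.2 '(' (hp p List.mem_cons_self) u rest hu]
    exact ih (pvRepl rest p) (fun q hq => hp q (List.mem_cons_of_mem _ hq))

theorem pv_fold_lparen (ps : List (List Char × List Char))
    (hps : ∀ p ∈ ps, p.1.head? = some '(' ∧ p.2 ≠ [])
    (hx : ∀ p ∈ ps, ∀ q ∈ ps, ∀ c ∈ q.1.tail, p.2.head? ≠ some c) :
    ∀ (s : List Char), (∀ p ∈ ps, ¬ p.1.tail <+: s) →
      ps.foldl pvRepl ('(' :: s) = '(' :: ps.foldl pvRepl s := by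
  induction ps with
  | nil => intro s _; rfl
  | cons p ps ih =>
    intro s hnm
    obtain ⟨h0, hne⟩ := hps p List.mem_cons_self
    have hnp : ¬ p.1 <+: ('(' :: s) := by
      rcases hp1 : p.1 with _ | ⟨o, t⟩
      · rw [hp1] at h0; simp at h0
      · have ho : o = '(' := by rw [hp1] at h0; simpa using h0
        intro hpp
        exact hnm p List.mem_cons_self
          (by rw [hp1]; simpa using (List.cons_prefix_cons.mp (ho ▸ hpp)).2)
    rw [List.foldl_cons, List.foldl_cons]
    rw [show pvRepl ('(' :: s) p = '(' :: pvRepl s p from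
        pv_replace_cons_not_prefix p.1 p.2 (by intro hn; rw [hn] at h0; simp at h0) _ _ hnp]
    refine ih (fun q hq => hps q (List.mem_cons_of_mem _ hq))
      (fun q hq r hr => hx q (List.mem_cons_of_mem _ hq) r (List.mem_cons_of_mem _ hr))
      (pvRepl s p) ?_
    intro q hq hqp
    have hq' : q ∈ p :: ps := List.mem_cons_of_mem _ hq
    refine hnm q hq' ?_
    exact pv_prefix_replace_rev p.1 p.2 (by intro hn; rw [hn] at h0; simp at h0) hne
      s q.1.tail (fun c hc => hx p List.mem_cons_self q hq' c hc) hqp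

-- the 15 sequential replace passes equal B's single token scan
set_option maxRecDepth 4096 in
theorem pv_chain_eq_tokenSub : ∀ (l : List Char), pvTokens.foldl pvRepl l = pvTokenSub l := by
  have F1 : ∀ p ∈ pvTokens, p.1.length = 5 ∧ p.1.head? = some '(' ∧ p.1.tail.all (· != '(') = true
      ∧ p.2 ≠ [] ∧ p.2.all (· != '(') = true := by decide
  have F2 : ∀ p ∈ pvTokens, ∀ q ∈ pvTokens, ∀ c ∈ q.1.tail, p.2.head? ≠ some c := by
    have hb : ∀ p ∈ pvTokens, ∀ q ∈ pvTokens,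
        (q.1.tail.all (fun c => p.2.head? != some c)) = true := by decide
    intro p hp q hq c hc
    have := hb p hp q hq
    simp only [List.all_eq_true, bne_iff_ne] at this
    exact this c hc
  suffices H : ∀ (n : Nat) (l : List Char), l.length ≤ n →
      pvTokens.foldl pvRepl l = pvTokenSub l from fun l => H l.length l le_rfl
  intro n
  induction n with
  | zero =>
    intro l h
    have : l = [] := List.eq_nil_of_length_eq_zero (by omega)
    subst this
    rw [pvTokenSub]
    decide
  | succ n ih =>
    intro l hlen
    cases l with
    | nil =>
      rw [pvTokenSub]
      decide
    | cons c rest =>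
      rw [pvTokenSub]
      cases hfind : pvTokens.find? (fun p => p.1.isPrefixOf (c :: rest)) with
      | some p =>
        obtain ⟨hpred, P₁, P₂, hsplit, hnone⟩ := List.find?_eq_some_iff_append.mp hfind
        have hpmem : p ∈ pvTokens := by rw [hsplit]; exact List.mem_append_right _ List.mem_cons_self
        obtain ⟨hl5, hh, htfb, hne2, hpfb⟩ := F1 p hpmem
        have htf : ∀ c ∈ p.1.tail, c ≠ '(' := by simpa using htfb
        have hpf : ∀ c ∈ p.2, c ≠ '(' := by simpa using hpfb
        have hpre : p.1 <+: (c :: rest) := List.isPrefixOf_iff_prefix.mp (by simpa using hpred)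
        obtain ⟨s₂, hs₂⟩ := hpre
        have hs₂' : s₂ = rest.drop 4 := by
          have h5 : (p.1 ++ s₂).drop 5 = s₂ := List.drop_left' hl5
          rw [hs₂] at h5
          simpa using h5.symm
        rcases hp1 : p.1 with _ | ⟨o, t'⟩
        · rw [hp1] at hh; simp at hh
        have ho : o = '(' := by rw [hp1] at hh; simpa using hh
        subst ho
        have ht'len : t'.length = 4 := by rw [hp1] at hl5; simpa using hl5
        have htf' : ∀ x ∈ t', x ≠ '(' := by
          intro x hx; exact htf x (by rw [hp1]; simpa using hx)
        rw [← hs₂, hp1]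
        rw [hsplit, List.foldl_append, List.foldl_cons]
        have h1 : P₁.foldl pvRepl (('(' :: t') ++ s₂) = ('(' :: t') ++ P₁.foldl pvRepl s₂ := by
          refine pv_fold_token_no_match P₁ t' s₂ ?_ htf'
          intro q hq
          have hqmem : q ∈ pvTokens := by rw [hsplit]; exact List.mem_append_left _ hq
          obtain ⟨hq5, hqh, _, _, _⟩ := F1 q hqmem
          refine ⟨hqh, by omega, ?_⟩
          intro hqp
          have : q.1 = '(' :: t' := List.IsPrefix.eq_of_length hqp (by simp; omega)
          have hqpred := hnone q hq
          rw [this, ← hp1] at hqpred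
          simp [hpred] at hqpred
        rw [h1]
        rw [show pvRepl (('(' :: t') ++ P₁.foldl pvRepl s₂) p
              = p.2 ++ pvRepl (P₁.foldl pvRepl s₂) p by
            simp only [pvRepl, hp1]
            exact pv_replace_append_self ('(' :: t') p.2 _ (by simp)]
        have h2 : P₂.foldl pvRepl (p.2 ++ pvRepl (P₁.foldl pvRepl s₂) p)
            = p.2 ++ P₂.foldl pvRepl (pvRepl (P₁.foldl pvRepl s₂) p) := by
          refine pv_fold_free P₂ p.2 _ hpf ?_
          intro q hq
          have hqmem : q ∈ pvTokens := by
            rw [hsplit]; exact List.mem_append_right _ (List.mem_cons_of_mem _ hq)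
          exact (F1 q hqmem).2.1
        rw [h2]
        have h3 : P₂.foldl pvRepl (pvRepl (P₁.foldl pvRepl s₂) p) = pvTokens.foldl pvRepl s₂ := by
          rw [hsplit, List.foldl_append, List.foldl_cons]
        rw [h3, ih s₂ (by rw [hs₂']; simp only [List.length_drop]; simp at hlen; omega)]
        rw [hs₂']
      | none =>
        have hnm : ∀ p ∈ pvTokens, ¬ p.1 <+: (c :: rest) := by
          intro p hp hq
          have := List.find?_eq_none.mp hfind p hp
          simp [List.isPrefixOf_iff_prefix] at this
          exact this hq
        have hrest : rest.length ≤ n := by simpa using hlen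
        by_cases hc : c = '('
        · subst hc
          rw [pv_fold_lparen pvTokens
              (fun p hp => ⟨(F1 p hp).2.1, (F1 p hp).2.2.2.1⟩) F2 rest ?_]
          · rw [ih rest hrest]
          · intro p hp hpre
            refine hnm p hp ?_
            rcases hp1 : p.1 with _ | ⟨o, t'⟩
            · have := (F1 p hp).2.1; rw [hp1] at this; simp at this
            · have ho : o = '(' := by
                have := (F1 p hp).2.1; rw [hp1] at this; simpa using this
              subst ho
              exact List.cons_prefix_cons.mpr ⟨rfl, by rw [hp1] at hpre; simpa using hpre⟩
        · rw [show (c :: rest) = [c] ++ rest from rfl,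
              pv_fold_free pvTokens [c] rest (by simpa using hc)
                (fun p hp => (F1 p hp).2.1)]
          rw [ih rest hrest]
          rfl

-- A's enumerate loop with the skip flag equals B's two-char scan
theorem pv_phase1 : ∀ (suf pre acc : List Char),
    (PySem.List.enumerate suf (pre.length : Int)).foldl (pvStepA (pre ++ suf)) (acc, false)
      = (acc ++ pvCaseRestore suf, false) := by
  intro suf
  induction suf using pvCaseRestore.induct with
  | case1 => intro pre acc; simp [pvCaseRestore]
  | case2 c rest ih =>
    intro pre acc
    rw [PySem.List.enumerate_cons, PySem.List.enumerate_cons]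
    rw [List.foldl_cons, List.foldl_cons]
    rw [show pvStepA (pre ++ '^' :: c :: rest) (acc, false) ((pre.length : Int), '^')
          = (acc ++ [PySem.Chars.upperChar c], true) by
        rw [pvStepA]
        rw [if_neg (by simp)]
        rw [if_pos ⟨rfl, by simp only [PySem.List.len_eq, List.length_append, List.length_cons]; push_cast; omega⟩]
        rw [show ((pre.length : Int) + 1) = ((pre.length + 1 : Nat) : Int) by push_cast; ring]
        rw [PySem.List.pyGetD_natCast]
        simp]
    rw [show pvStepA (pre ++ '^' :: c :: rest) (acc ++ [PySem.Chars.upperChar c], true)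
          ((pre.length : Int) + 1, c) = (acc ++ [PySem.Chars.upperChar c], false) by
        rw [pvStepA]; simp]
    rw [show (pre.length : Int) + 1 + 1 = (((pre ++ ['^', c]).length : Nat) : Int) by
        simp; ring]
    rw [show pre ++ '^' :: c :: rest = (pre ++ ['^', c]) ++ rest by simp]
    rw [ih (pre ++ ['^', c]) (acc ++ [PySem.Chars.upperChar c])]
    simp [pvCaseRestore]
  | case3 c rest hno ih =>
    intro pre acc
    by_cases hc : c = '^'
    · subst hc
      rcases rest with _ | ⟨d, rest'⟩
      · rw [PySem.List.enumerate_cons]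
        rw [List.foldl_cons]
        rw [show pvStepA (pre ++ ['^']) (acc, false) ((pre.length : Int), '^')
              = (acc ++ ['^'], false) by
            rw [pvStepA]
            rw [if_neg (by simp)]
            rw [if_neg (by simp only [PySem.List.len_eq, List.length_append, List.length_cons, List.length_nil]; push_cast; omega)]]
        simp [pvCaseRestore]
      · exact (hno d rest' rfl rfl).elim
    · rw [PySem.List.enumerate_cons, List.foldl_cons]
      rw [show pvStepA (pre ++ c :: rest) (acc, false) ((pre.length : Int), c)
            = (acc ++ [c], false) by
          rw [pvStepA]
          rw [if_neg (by simp)]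
          rw [if_neg (by intro h; exact hc h.1)]]
      rw [show (pre.length : Int) + 1 = (((pre ++ [c]).length : Nat) : Int) by simp]
      rw [show pre ++ c :: rest = (pre ++ [c]) ++ rest by simp]
      rw [ih (pre ++ [c]) (acc ++ [c])]
      have : pvCaseRestore (c :: rest) = c :: pvCaseRestore rest := by
        rw [pvCaseRestore.eq_def]
        cases rest with
        | nil => simp
        | cons d r => simp
      rw [this]
      simp

-- the String-level replace fold is the char-level fold
theorem pv_strfold (ps : List (String × String)) :
    ∀ (s : String),
      ps.foldl (fun a p => PySem.Str.replace a p.1 p.2) s =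
        String.ofList ((ps.map (fun p => (p.1.toList, p.2.toList))).foldl pvRepl s.toList) := by
  induction ps with
  | nil => intro s; simp [String.ofList_toList]
  | cons p ps ih =>
    intro s
    rw [List.foldl_cons, List.map_cons, List.foldl_cons]
    rw [ih (PySem.Str.replace s p.1 p.2)]
    rw [show (PySem.Str.replace s p.1 p.2).toList = pvRepl s.toList (p.1.toList, p.2.toList) by
      simp [PySem.Str.toList_replace, pvRepl]]

-- ===== VERDICT (by name: the statement is the Claim_ definition above) =====
theorem filename_to_espeak_spec : Claim_equal_filename_to_espeak := by
  intro s _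
  show filename_to_espeak s = filename_to_espeak_alt s
  simp only [filename_to_espeak, filename_to_espeak_alt]
  have hitems : (pvPHONETIC_MAP.items.foldl (fun d p => d.insert p.2 p.1) PySem.Dict.empty).items
      = [("(hsh)", "#"), ("(pri)", "'"), ("(sec)", ","), ("(uns)", "%"), ("(pre)", "="),
         ("(bou)", "||"), ("(sep)", "|"), ("(pau)", ":"), ("(ssp)", "_"), ("(lst)", "<"),
         ("(grt)", ">"), ("(dbq)", "\""), ("(bks)", "/"), ("(qsm)", "?"), ("(ast)", "*")] := by
    decide
  rw [hitems, pv_strfold]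
  rw [show ([("(hsh)", "#"), ("(pri)", "'"), ("(sec)", ","), ("(uns)", "%"), ("(pre)", "="),
         ("(bou)", "||"), ("(sep)", "|"), ("(pau)", ":"), ("(ssp)", "_"), ("(lst)", "<"),
         ("(grt)", ">"), ("(dbq)", "\""), ("(bks)", "/"), ("(qsm)", "?"), ("(ast)", "*")]
        : List (String × String)).map (fun p => (p.1.toList, p.2.toList)) = pvTokens by decide]
  rw [String.toList_ofList]
  have h1 := pv_phase1 s.toList [] []
  simp only [List.nil_append, List.length_nil, Nat.cast_zero] at h1
  rw [h1, pv_chain_eq_tokenSub]
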